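-- pv_equiv track=rewrite | github.com/umr-ds/RepairNatrix | scripts/constraints/check_constraints.py | allmax
-- ===== SOURCE A (Python) =====
-- def allmax(a, return_index=True):
--     if len(a) == 0:
--         return []
--     all_ = [0]
--     max_ = a[0]
--     all_max_ = [a[0]]
--     for i in range(1, len(a)):
--         if a[i] > max_:
--             all_ = [i]
--             max_ = a[i]
--             all_max_ = [a[i]]
--         elif a[i] == max_:
--             all_.append(i)
--             all_max_.append(a[i])
--     if return_index:
--         return all_
--     else:
--         return all_max_
-- ===== SOURCE B (Python) =====
-- def allmax(a, return_index=True):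
--     if len(a) == 0:
--         return []
--     m = max(a)
--     if return_index:
--         return [i for i, x in enumerate(a) if x == m]
--     return [x for x in a if x == m]
-- ===== Notes on version B (the rewrite author's own statement) =====
-- stated objective: simpler
-- what changed: Replaces A's single running-max pass maintaining two parallel accumulator lists with a compute-max-then-filter decomposition: one max() pass, then one comprehension collecting matching indices or values.
import Mathlib
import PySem

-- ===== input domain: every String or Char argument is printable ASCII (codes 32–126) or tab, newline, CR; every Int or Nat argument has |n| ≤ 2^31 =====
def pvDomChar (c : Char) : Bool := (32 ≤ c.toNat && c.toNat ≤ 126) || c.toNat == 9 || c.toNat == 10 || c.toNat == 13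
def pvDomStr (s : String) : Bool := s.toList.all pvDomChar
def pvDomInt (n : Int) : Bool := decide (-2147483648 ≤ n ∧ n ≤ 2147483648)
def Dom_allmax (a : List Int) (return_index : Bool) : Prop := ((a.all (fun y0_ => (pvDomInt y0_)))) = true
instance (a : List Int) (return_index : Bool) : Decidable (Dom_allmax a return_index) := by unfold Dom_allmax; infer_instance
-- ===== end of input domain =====

-- B replaces A's single running-max pass (parallel index/value accumulator lists) with a
-- compute-max-then-filter decomposition; objective: simpler.

-- ===== PORT A =====
-- the loop body of A, one step per index i with value ai = a[i] (indices from range(1, len(a)) are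
-- always in range, so pyGetD with default 0 is exact)
def allmaxStep (st : List Int × Int × List Int) (p : Int × Int) : List Int × Int × List Int :=
  if p.2 > st.2.1 then ([p.1], p.2, [p.2])
  else if p.2 = st.2.1 then (st.1 ++ [p.1], st.2.1, st.2.2 ++ [p.2])
  else st

def allmax (a : List Int) (return_index : Bool) : List Int :=
  if PySem.List.len a = 0 then []
  else
    let a0 := PySem.List.pyGetD a 0 0
    let st := (PySem.List.pyRange 1 (PySem.List.len a) 1).foldl
      (fun st i => allmaxStep st (i, PySem.List.pyGetD a i 0)) ([0], a0, [a0])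
    if return_index then st.1 else st.2.2

-- ===== PORT B =====
def allmax_alt (a : List Int) (return_index : Bool) : List Int :=
  if PySem.List.len a = 0 then []
  else
    let m := (PySem.List.max? a (fun y => y)).getD 0
    if return_index then
      ((PySem.List.enumerate a 0).filter (fun p => p.2 == m)).map (fun p => p.1)
    else
      a.filter (fun x => x == m)

-- ===== PRECONDITION & SPEC =====
def Spec_allmax (a : List Int) (return_index : Bool) (out : List Int) : Prop := out = allmax_alt a return_index
instance (a : List Int) (return_index : Bool) (out : List Int) : Decidable (Spec_allmax a return_index out) := by unfold Spec_allmax; infer_instance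

-- ===== CLAIM (what is proved, stated in full; the proofs are below) =====
def Claim_equal_allmax : Prop := ∀ (a : List Int) (return_index : Bool), Dom_allmax a return_index → Spec_allmax a return_index (allmax a return_index)

-- ===== LEMMAS AND PROOFS =====

-- A's loop, run over the enumerated tail from any state, yields the compute-max-then-filter form.
theorem allmax_loop (ys : List Int) (s : Int) (I : List Int) (m : Int) (V : List Int) :
    (PySem.List.enumerate ys s).foldl allmaxStep (I, m, V) =
      ((if ys.foldl max m = m then I else []) ++
        ((PySem.List.enumerate ys s).filter (fun p => p.2 == ys.foldl max m)).map (fun p => p.1),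
       ys.foldl max m,
       (if ys.foldl max m = m then V else []) ++
        ((PySem.List.enumerate ys s).filter (fun p => p.2 == ys.foldl max m)).map (fun p => p.2)) := by
  induction ys generalizing s I m V with
  | nil => simp [PySem.List.enumerate_nil]
  | cons y ys ih =>
    rw [PySem.List.enumerate_cons]
    simp only [List.foldl_cons]
    rcases lt_trichotomy m y with h | h | h
    · -- y > m : reset
      have hstep : allmaxStep (I, m, V) (s, y) = ([s], y, [y]) := by
        simp [allmaxStep, h]
      rw [hstep, ih]
      have hmax : max m y = y := max_eq_right h.le
      simp only [hmax]
      have hy : y ≤ ys.foldl max y := (PySem.List.le_foldl_max ys y).1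
      have hne : ¬ ys.foldl max y = m := by omega
      by_cases hyM : y = ys.foldl max y
      · simp [← hyM]
        exact ⟨fun he => absurd he (by omega), fun he => absurd he (by omega)⟩
      · have hb : (y == ys.foldl max y) = false := by simp [hyM]
        have hyM' : ¬ ys.foldl max y = y := by omega
        simp [hb, hne, hyM']
    · -- y = m : append
      simp only [← h]
      have hstep : allmaxStep (I, m, V) (s, m) = (I ++ [s], m, V ++ [m]) := by
        simp [allmaxStep]
      rw [hstep, ih]
      simp only [max_self]
      by_cases hMy : ys.foldl max m = m
      · simp [hMy]
      · have hm : m ≤ ys.foldl max m := (PySem.List.le_foldl_max ys m).1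
        have hb : (m == ys.foldl max m) = false := by simp; omega
        simp [hMy, hb]
    · -- y < m : skip
      have h1 : ¬ (y > m) := by omega
      have h2 : ¬ (y = m) := by omega
      have hstep : allmaxStep (I, m, V) (s, y) = (I, m, V) := by
        simp [allmaxStep, h1, h2]
      rw [hstep, ih]
      have hmax : max m y = m := max_eq_left h.le
      simp only [hmax]
      have hm : m ≤ ys.foldl max m := (PySem.List.le_foldl_max ys m).1
      have hb : (y == ys.foldl max m) = false := by simp; omega
      simp [hb]

-- Python's max(a) (first extremal element) has the same value as the running fold max.
theorem max?_eq_foldl (x : Int) (xs : List Int) :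
    (PySem.List.max? (x :: xs) (fun y => y)).getD 0 = xs.foldl max x := by
  rw [PySem.List.max?_id_cons]
  rfl

-- projecting the values out of the filtered enumeration is plain list filtering
theorem filter_enumerate_snd (ys : List Int) (s M : Int) :
    ((PySem.List.enumerate ys s).filter (fun p => p.2 == M)).map (fun p => p.2) =
      ys.filter (fun x => x == M) := by
  induction ys generalizing s with
  | nil => simp [PySem.List.enumerate_nil]
  | cons y ys ih =>
    rw [PySem.List.enumerate_cons]
    by_cases h : y = M
    · simp [h, ih]
    · simp [h, ih]

theorem allmax_eq_alt (a : List Int) (return_index : Bool) :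
    allmax a return_index = allmax_alt a return_index := by
  cases a with
  | nil => simp [allmax, allmax_alt]
  | cons x xs =>
    have hlen : ¬ PySem.List.len (x :: xs) = 0 := by simp; omega
    have ha0 : PySem.List.pyGetD (x :: xs) 0 0 = x := by
      simp [PySem.List.pyGetD, PySem.List.pyGet?, PySem.List.pyIdx?]
    -- rewrite A's pyRange-indexed loop as a loop over the enumerated tail
    have henum : (PySem.List.pyRange 1 (PySem.List.len (x :: xs)) 1).map
        (fun j => (j, PySem.List.pyGetD (x :: xs) j 0)) = PySem.List.enumerate xs 1 := by
      have he := PySem.List.enumerate_eq_map_pyRange (x :: xs) 0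
      rw [PySem.List.pyRange_one_cons (by simp)] at he
      rw [PySem.List.enumerate_cons, List.map_cons, ha0] at he
      rw [List.cons_eq_cons] at he
      have h2 := he.2
      norm_num at h2
      exact h2.symm
    have hfold : (PySem.List.pyRange 1 (PySem.List.len (x :: xs)) 1).foldl
        (fun st i => allmaxStep st (i, PySem.List.pyGetD (x :: xs) i 0)) ([0], x, [x]) =
        (PySem.List.enumerate xs 1).foldl allmaxStep ([0], x, [x]) := by
      rw [← henum, List.foldl_map]
    simp only [allmax, allmax_alt, if_neg hlen, ha0]
    rw [hfold, allmax_loop, max?_eq_foldl]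
    cases return_index with
    | true =>
      simp only [if_true]
      rw [PySem.List.enumerate_cons]
      by_cases hx : x = xs.foldl max x
      · simp [← hx]
      · have hb : (x == xs.foldl max x) = false := by simp [hx]
        have hx' : ¬ xs.foldl max x = x := fun hh => hx hh.symm
        simp [hb, hx']
    | false =>
      simp only [Bool.false_eq_true, if_false]
      rw [filter_enumerate_snd]
      by_cases hx : x = xs.foldl max x
      · simp [← hx]
      · have hb : (x == xs.foldl max x) = false := by simp [hx]
        have hx' : ¬ xs.foldl max x = x := fun hh => hx hh.symm
        simp [hb, hx']

-- ===== VERDICT (by name: the statement is the Claim_ definition above) =====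
theorem allmax_spec : Claim_equal_allmax := by
  intro a return_index _
  unfold Spec_allmax
  exact allmax_eq_alt a return_index
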